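-- pv_equiv track=rewrite | github.com/pawelrubin/Programming-And-Classification | lab/lab03.py | task29
-- ===== SOURCE A (Python) =====
-- from itertools import combinations, product
-- from typing import Dict, List, Set, Tuple, TypeVar
--
-- def task29(b: str, n: int) -> List[str]:
--     return [
--         "".join(
--             [
--                 f"{int(bit, 2) ^ 1:b}" if index in indices else bit
--                 for index, bit in enumerate(b)
--             ]
--         )
--         for indices in combinations(range(len(b)), n)
--     ]
-- ===== SOURCE B (Python) =====
-- def task29(b, n):
--     # Recursive backtracking over positions carrying a remaining-flip budget,
--     # flip branch first so the output order matches combinations' lexicographic order.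
--     out = []
--
--     def go(i, budget, acc):
--         if i == len(b):
--             if budget == 0:
--                 out.append("".join(acc))
--             return
--         if budget > 0:
--             acc.append("1" if b[i] == "0" else "0")
--             go(i + 1, budget - 1, acc)
--             acc.pop()
--         acc.append(b[i])
--         go(i + 1, budget, acc)
--         acc.pop()
--
--     go(0, n, [])
--     return out
-- ===== Notes on version B (the rewrite author's own statement) =====
-- stated objective: alternative
-- what changed: Replaced the itertools.combinations-based comprehension (which enumerates index sets and rescans the whole string per set) with a single recursive backtracking pass over positions carrying a remaining-flip budget, flip branch first to keep combinations' lexicographic order.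
import Mathlib
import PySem

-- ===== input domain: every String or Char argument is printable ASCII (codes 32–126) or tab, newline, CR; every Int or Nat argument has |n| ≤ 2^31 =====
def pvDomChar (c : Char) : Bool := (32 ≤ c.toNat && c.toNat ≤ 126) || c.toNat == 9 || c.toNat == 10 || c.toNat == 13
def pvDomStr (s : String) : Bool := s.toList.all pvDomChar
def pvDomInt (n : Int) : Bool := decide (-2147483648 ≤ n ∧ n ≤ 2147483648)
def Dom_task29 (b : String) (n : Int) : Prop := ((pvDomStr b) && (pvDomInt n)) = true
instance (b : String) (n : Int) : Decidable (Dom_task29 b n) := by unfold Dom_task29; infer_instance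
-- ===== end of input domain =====

-- B replaces the combinations-based comprehension with a recursive backtracking pass
-- carrying a remaining-flip budget (alternative decomposition, same cost).

-- ===== PORT A =====
-- f"{int(bit, 2) ^ 1:b}": exact on '0'/'1'; any other char makes Python raise
-- ValueError, and such inputs are excluded by Pre_task29.
def flipA (c : Char) : Char := if c = '0' then '1' else '0'

-- combinations(range(len(b)), n): Python raises ValueError for n < 0 (excluded by
-- Pre_task29); the guard only keeps the port total there.
def task29 (b : String) (n : Int) : List String :=
  if n < 0 then []
  else
    (PySem.List.combinations (PySem.List.pyRange 0 (b.toList.length : Int) 1) n.toNat).map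
      (fun I =>
        String.mk ((PySem.List.enumerate b.toList 0).map
          (fun p => if p.1 ∈ I then flipA p.2 else p.2)))

-- ===== PORT B =====
-- the recursive helper go(i, budget, acc) of Source B, over the remaining suffix of b
def goB (cs : List Char) (budget : Int) (acc : List Char) : List String :=
  match cs with
  | [] => if budget = 0 then [String.mk acc] else []
  | c :: rest =>
      (if budget > 0 then goB rest (budget - 1) (acc ++ [if c = '0' then '1' else '0']) else []) ++
      goB rest budget (acc ++ [c])

def task29_alt (b : String) (n : Int) : List String := goB b.toList n []

-- ===== PRECONDITION & SPEC =====
-- Pre_ excludes exactly the inputs where Python A raises ValueError: n < 0, and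
-- non-binary strings with 1 ≤ n ≤ len(b) (the flip expression is then evaluated).
def Pre_task29 (b : String) (n : Int) : Prop :=
  0 ≤ n ∧ (n = 0 ∨ (b.toList.length : Int) < n ∨ b.toList.all (fun c => c == '0' || c == '1') = true)
instance (b : String) (n : Int) : Decidable (Pre_task29 b n) := by
  unfold Pre_task29; infer_instance
def pvWitness_task29 : String × Int := ("01", 1)

def Spec_task29 (b : String) (n : Int) (out : List String) : Prop := out = task29_alt b n
instance (b : String) (n : Int) (out : List String) : Decidable (Spec_task29 b n out) := by
  unfold Spec_task29; infer_instance

-- ===== CLAIM (what is proved, stated in full; the proofs are below) =====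
def Claim_equal_task29 : Prop :=
  ∀ (b : String) (n : Int), Dom_task29 b n → Pre_task29 b n → Spec_task29 b n (task29 b n)

-- ===== LEMMAS AND PROOFS =====

-- common recursive description of the result, as lists of chars
def Fmid : List Char → Nat → List (List Char)
  | cs, 0 => [cs]
  | [], _ + 1 => []
  | c :: rest, k + 1 =>
      ((Fmid rest k).map (flipA c :: ·)) ++ ((Fmid rest (k + 1)).map (c :: ·))

theorem goB_eq_Fmid (cs : List Char) (k : Nat) (acc : List Char) :
    goB cs (k : Int) acc = (Fmid cs k).map (fun r => String.mk (acc ++ r)) := by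
  induction cs generalizing k acc with
  | nil =>
    cases k with
    | zero => simp [goB, Fmid]
    | succ k =>
      simp [goB, Fmid]
      omega
  | cons c rest ih =>
    cases k with
    | zero =>
      have h := ih 0 (acc ++ [c])
      simp only [Nat.cast_zero] at h
      simp [goB, Fmid, h, List.append_assoc]
    | succ k =>
      have h2 : ((k + 1 : Nat) : Int) > 0 := by exact_mod_cast Nat.succ_pos k
      have h1 : ((k + 1 : Nat) : Int) - 1 = ((k : Nat) : Int) := by push_cast; ring
      simp only [goB, if_pos h2, h1, ih, Fmid, List.map_append, List.map_map]
      congr 1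
      · apply List.map_congr_left
        intro r _
        simp [flipA, List.append_assoc]
      · apply List.map_congr_left
        intro r _
        simp [List.append_assoc]

theorem combs_eq_Fmid (cs : List Char) (k : Nat) (j : Int) :
    (PySem.List.combinations (PySem.List.pyRange j (j + (cs.length : Int)) 1) k).map
      (fun I => (PySem.List.enumerate cs j).map
        (fun p => if p.1 ∈ I then flipA p.2 else p.2)) = Fmid cs k := by
  induction cs generalizing k j with
  | nil =>
    cases k with
    | zero => simp [PySem.List.combinations_zero, PySem.List.enumerate_nil, Fmid]
    | succ k => simp [PySem.List.combinations_nil_succ, Fmid]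
  | cons c rest ih =>
    have hcons : PySem.List.pyRange j (j + ((c :: rest).length : Int)) 1 =
        j :: PySem.List.pyRange (j + 1) ((j + 1) + (rest.length : Int)) 1 := by
      have hlt : j < j + ((c :: rest).length : Int) := by
        push_cast [List.length_cons]; omega
      rw [PySem.List.pyRange_one_cons hlt]
      have harg : j + ((c :: rest).length : Int) = (j + 1) + (rest.length : Int) := by
        push_cast [List.length_cons]; ring
      rw [harg]
    cases k with
    | zero =>
      simp [PySem.List.combinations_zero, PySem.List.map_snd_enumerate, Fmid]
    | succ k =>
      rw [hcons, PySem.List.combinations_cons_succ]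
      rw [List.map_append, List.map_map]
      have hmemR : ∀ x ∈ PySem.List.pyRange (j + 1) ((j + 1) + (rest.length : Int)) 1,
          j < x := by
        intro x hx
        have := (PySem.List.mem_pyRange_one).1 hx
        omega
      have hfirst :
          (PySem.List.combinations
              (PySem.List.pyRange (j + 1) ((j + 1) + (rest.length : Int)) 1) k).map
            ((fun I => (PySem.List.enumerate (c :: rest) j).map
              (fun p => if p.1 ∈ I then flipA p.2 else p.2)) ∘ (j :: ·)) =
          (Fmid rest k).map (flipA c :: ·) := by
        rw [← ih k (j + 1), List.map_map]
        apply List.map_congr_left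
        intro I hI
        simp only [Function.comp_apply, PySem.List.enumerate_cons, List.map_cons,
          List.mem_cons, true_or, if_true]
        congr 1
        apply List.map_congr_left
        intro p hp
        obtain ⟨kk, hkk, rfl⟩ := (PySem.List.mem_enumerate_iff _ _ _).1 hp
        have hne : ¬ (j + 1 + (kk : Int) = j) := by omega
        simp [hne]
      have hsecond :
          (PySem.List.combinations
              (PySem.List.pyRange (j + 1) ((j + 1) + (rest.length : Int)) 1) (k + 1)).map
            (fun I => (PySem.List.enumerate (c :: rest) j).map
              (fun p => if p.1 ∈ I then flipA p.2 else p.2)) =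
          (Fmid rest (k + 1)).map (c :: ·) := by
        rw [← ih (k + 1) (j + 1), List.map_map]
        apply List.map_congr_left
        intro I hI
        have hsub := PySem.List.sublist_of_mem_combinations hI
        have hjI : j ∉ I := fun hj =>
          absurd (hmemR j (hsub.subset hj)) (lt_irrefl j)
        simp only [PySem.List.enumerate_cons, List.map_cons]
        rw [if_neg hjI]
        rfl
      rw [hfirst, hsecond]
      rfl

theorem task29_eq (b : String) (n : Int) (hn : 0 ≤ n) :
    task29 b n = task29_alt b n := by
  lift n to ℕ using hn with m
  unfold task29 task29_alt
  rw [if_neg (not_lt.2 (Int.natCast_nonneg m))]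
  rw [goB_eq_Fmid b.toList m []]
  simp only [Int.toNat_natCast]
  have h := combs_eq_Fmid b.toList m 0
  rw [zero_add] at h
  rw [← h, List.map_map]
  apply List.map_congr_left
  intro I _
  simp

-- ===== VERDICT (by name: the statement is the Claim_ definition above) =====
theorem task29_spec : Claim_equal_task29 := by
  intro b n _ hpre
  unfold Spec_task29
  exact task29_eq b n hpre.1
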